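-- pv_equiv track=rewrite | github.com/sungin95/TIL | python/코드테스트(연습)/백준/8일차/1652누울자리를찾아라.py | check_bed
-- ===== SOURCE A (Python) =====
-- def check_bed(data):
--     cnt_bed = 0
--     cnt_point = 0
--     for check in data: # 체크식
--         if check == "X": # X를 만났을때
--             if cnt_point >= 2: # ..이상이면
--                 cnt_bed += 1 # 누울수 있는 자리
--             cnt_point = 0 # .갯수 초기화
--         else:    # .을 만났을때
--             cnt_point += 1 # . 갯수 카운트
--     else: # 계산이 끝나면
--         if cnt_point >= 2: # 벽을 만났을때 ..이상이라면
--             cnt_bed += 1 # 누울수 있는 자리 하나 추가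
--         cnt_point = 0 # .갯수 초기화 # 필요없긴 하다.
--     return cnt_bed
-- ===== SOURCE B (Python) =====
-- def check_bed(data):
--     segments = data.split("X")
--     return sum(1 for s in segments if len(s) >= 2)
-- ===== Notes on version B (the rewrite author's own statement) =====
-- stated objective: simpler
-- what changed: Replaced the per-character running-counter state machine (with its end-of-loop flush) by partitioning the string with str.split('X') and counting the resulting segments of length >= 2.
import Mathlib
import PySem

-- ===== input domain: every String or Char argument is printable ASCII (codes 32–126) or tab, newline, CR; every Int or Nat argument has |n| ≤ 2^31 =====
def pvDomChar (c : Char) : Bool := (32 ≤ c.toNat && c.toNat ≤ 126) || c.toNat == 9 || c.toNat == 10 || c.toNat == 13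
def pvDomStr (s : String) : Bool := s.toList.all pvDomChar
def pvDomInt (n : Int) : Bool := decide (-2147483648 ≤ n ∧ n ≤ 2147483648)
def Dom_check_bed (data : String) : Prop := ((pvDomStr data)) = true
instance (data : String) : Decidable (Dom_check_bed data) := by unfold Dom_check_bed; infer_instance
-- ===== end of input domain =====

-- B replaces A's per-character counter state machine by splitting on 'X' and counting segments of length ≥ 2 (simpler decomposition, same cost).


-- ===== PORT A =====
-- one loop step of A: on 'X' flush the run counter, else extend it
def checkBedStep (st : Int × Int) (c : Char) : Int × Int :=
  if c = 'X' then ((if st.2 ≥ 2 then st.1 + 1 else st.1), 0)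
  else (st.1, st.2 + 1)

def check_bed (data : String) : Int :=
  let s := data.toList.foldl checkBedStep (0, 0)
  if s.2 ≥ 2 then s.1 + 1 else s.1

-- ===== PORT B =====
def check_bed_alt (data : String) : Int :=
  ((PySem.Chars.splitOn data.toList "X".toList).countP (fun s => 2 ≤ s.length) : Int)

-- ===== PRECONDITION & SPEC =====
def Spec_check_bed (data : String) (out : Int) : Prop := out = check_bed_alt data
instance (data : String) (out : Int) : Decidable (Spec_check_bed data out) := by unfold Spec_check_bed; infer_instance

-- ===== CLAIM (what is proved, stated in full; the proofs are below) =====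
def Claim_equal_check_bed : Prop := ∀ (data : String), Dom_check_bed data → Spec_check_bed data (check_bed data)

-- ===== LEMMAS AND PROOFS =====

-- reference count: beds in l given a current run of length p
def bedCount : Nat → List Char → Nat
  | p, [] => if 2 ≤ p then 1 else 0
  | p, c :: t => if c = 'X' then (if 2 ≤ p then 1 else 0) + bedCount 0 t else bedCount (p + 1) t

-- the segments split("X") produces, as a plain recursion (cur = current segment so far)
def runsAux (cur : List Char) : List Char → List (List Char)
  | [] => [cur]
  | c :: t => if c = 'X' then cur :: runsAux [] t else runsAux (cur ++ [c]) t

lemma foldA_eq : ∀ (l : List Char) (bed : Int) (p : Nat),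
    (let s := l.foldl checkBedStep (bed, (p : Int)); if s.2 ≥ 2 then s.1 + 1 else s.1)
      = bed + bedCount p l := by
  intro l
  induction l with
  | nil => intro bed p; simp [bedCount]; split_ifs <;> omega
  | cons c t ih =>
    intro bed p
    simp only [List.foldl_cons, checkBedStep, bedCount]
    by_cases hc : c = 'X'
    · simp only [hc, if_true]
      have := ih (if (p : Int) ≥ 2 then bed + 1 else bed) 0
      simp only [Nat.cast_zero] at this
      rw [this]
      split_ifs <;> omega
    · simp only [if_neg hc]
      have := ih bed (p + 1)
      push_cast at this ⊢
      rw [this]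

lemma go_eq : ∀ (l : List Char) (fuel : Nat) (cur : List Char) (acc : List (List Char)),
    l.length ≤ fuel →
    PySem.Chars.splitOn.go "X".toList fuel l cur acc = acc.reverse ++ runsAux cur.reverse l := by
  intro l
  induction l with
  | nil =>
    intro fuel cur acc _
    cases fuel <;> simp [PySem.Chars.splitOn.go, runsAux]
  | cons c t ih =>
    intro fuel cur acc h
    cases fuel with
    | zero => simp at h
    | succ f =>
      simp only [PySem.Chars.splitOn.go]
      by_cases hc : c = 'X'
      · have hp : List.isPrefixOf "X".toList (c :: t) = true := by
          subst hc; simp [List.isPrefixOf]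
        rw [if_pos hp]
        have : List.drop ("X".toList).length (c :: t) = t := by simp
        rw [this, ih f [] (cur.reverse :: acc) (by simpa using Nat.le_of_succ_le_succ h)]
        simp [runsAux, hc]
      · have hp : List.isPrefixOf "X".toList (c :: t) = false := by
          simp [List.isPrefixOf]; intro h'; exact hc h'.symm
        rw [if_neg (by rw [hp]; exact Bool.false_ne_true)]
        rw [ih f (c :: cur) acc (Nat.le_of_succ_le_succ h)]
        simp [runsAux, hc]

lemma countP_runsAux : ∀ (l cur : List Char),
    (runsAux cur l).countP (fun s => 2 ≤ s.length) = bedCount cur.length l := by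
  intro l
  induction l with
  | nil => intro cur; simp [runsAux, bedCount, List.countP_cons]
  | cons c t ih =>
    intro cur
    simp only [runsAux, bedCount]
    by_cases hc : c = 'X'
    · simp only [if_pos hc]
      rw [List.countP_cons]
      have := ih []
      simp at this
      rw [this]
      by_cases h2 : 2 ≤ cur.length <;> simp [h2] <;> omega
    · simp only [if_neg hc]
      have := ih (cur ++ [c])
      simpa using this

-- ===== VERDICT (by name: the statement is the Claim_ definition above) =====
theorem check_bed_spec : Claim_equal_check_bed := by
  intro data _
  unfold Spec_check_bed check_bed check_bed_alt PySem.Chars.splitOn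
  rw [go_eq _ _ _ _ (by omega)]
  have h := foldA_eq data.toList 0 0
  simp only [Nat.cast_zero] at h
  rw [h]
  simp only [List.reverse_nil, List.nil_append, countP_runsAux, List.length_nil]
  omega
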